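-- pv_equiv track=rewrite | github.com/tvh25082004/agent | AgentIssue-Bench/find_issue.py | count_operators
-- ===== SOURCE A (Python) =====
-- def count_operators(term_lists):
--     num_ors = 0
--     num_ands = 0
--     active_lists = 0
--     for term_list in term_lists:
--         if term_list:
--             num_ors += max(0, len(term_list) - 1)
--             active_lists +=1
--     if active_lists > 1:
--         num_ands = active_lists - 1
--     return num_ors + num_ands
-- ===== SOURCE B (Python) =====
-- def count_operators(term_lists):
--     flat = [x for t in term_lists if t for x in t]
--     return len(flat) - 1 if flat else 0
-- ===== Notes on version B (the rewrite author's own statement) =====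
-- stated objective: simpler
-- what changed: Instead of maintaining three numeric counters (num_ors, num_ands, active_lists) and a final branch, B materializes the concatenation of the non-empty term lists in one comprehension and returns its length minus 1 (0 when it is empty).
import Mathlib
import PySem

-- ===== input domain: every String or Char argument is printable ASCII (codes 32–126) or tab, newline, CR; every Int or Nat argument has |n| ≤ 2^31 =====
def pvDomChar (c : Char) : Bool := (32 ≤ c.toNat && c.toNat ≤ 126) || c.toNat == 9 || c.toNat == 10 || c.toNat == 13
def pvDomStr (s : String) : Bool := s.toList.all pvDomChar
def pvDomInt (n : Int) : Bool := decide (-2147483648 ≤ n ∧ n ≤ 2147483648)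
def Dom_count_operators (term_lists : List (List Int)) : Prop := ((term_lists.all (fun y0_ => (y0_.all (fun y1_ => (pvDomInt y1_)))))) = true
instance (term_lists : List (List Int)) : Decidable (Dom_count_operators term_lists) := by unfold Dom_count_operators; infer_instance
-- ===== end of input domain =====

-- B builds the concatenation of the non-empty term lists and returns its length minus 1 (0 when empty), replacing A's three counters and final branch; objective: simpler.

-- ===== PORT A =====
-- loop state: (num_ors, active_lists)
def count_operators (term_lists : List (List Int)) : Int :=
  let s := term_lists.foldl
    (fun (p : Int × Int) term_list =>
      if term_list ≠ [] then
        (p.1 + max 0 ((term_list.length : Int) - 1), p.2 + 1)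
      else p)
    (0, 0)
  let num_ands : Int := if s.2 > 1 then s.2 - 1 else 0
  s.1 + num_ands

-- ===== PORT B =====
def count_operators_alt (term_lists : List (List Int)) : Int :=
  let flat := (term_lists.filter (fun t => t ≠ [])).flatMap id
  if flat ≠ [] then (flat.length : Int) - 1 else 0

-- ===== PRECONDITION & SPEC =====
def Spec_count_operators (term_lists : List (List Int)) (out : Int) : Prop := out = count_operators_alt term_lists
instance (term_lists : List (List Int)) (out : Int) : Decidable (Spec_count_operators term_lists out) := by unfold Spec_count_operators; infer_instance

-- ===== CLAIM (what is proved, stated in full; the proofs are below) =====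
def Claim_equal_count_operators : Prop := ∀ (term_lists : List (List Int)), Dom_count_operators term_lists → Spec_count_operators term_lists (count_operators term_lists)

-- ===== LEMMAS AND PROOFS =====

-- A's fold, started at (a, c), ends at (a + S - K, c + K) where S is the length of the
-- concatenation of the non-empty lists and K their number; also S ≥ K.
theorem pv_fold_char (tl : List (List Int)) (a c : Int) :
    (tl.foldl
      (fun (p : Int × Int) term_list =>
        if term_list ≠ [] then
          (p.1 + max 0 ((term_list.length : Int) - 1), p.2 + 1)
        else p) (a, c))
      = (a + (((tl.filter (fun t => t ≠ [])).flatMap id).length : Int)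
            - ((tl.filter (fun t => t ≠ [])).length : Int),
         c + ((tl.filter (fun t => t ≠ [])).length : Int))
    ∧ ((tl.filter (fun t => t ≠ [])).length : Int)
        ≤ (((tl.filter (fun t => t ≠ [])).flatMap id).length : Int) := by
  induction tl generalizing a c with
  | nil => simp
  | cons h t ih =>
    by_cases hh : h = []
    · simpa [hh] using ih a c
    · have hlen : 1 ≤ (h.length : Int) := by
        have : 0 < h.length := List.length_pos_of_ne_nil hh
        exact_mod_cast this
      obtain ⟨h1, h2⟩ := ih (a + max 0 ((h.length : Int) - 1)) (c + 1)
      have hmax : max 0 ((h.length : Int) - 1) = (h.length : Int) - 1 :=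
        max_eq_right (by omega)
      rw [hmax] at h1
      simp only [ne_eq] at h1 h2
      simp only [List.foldl_cons, List.filter_cons, List.flatMap_cons, hh, ne_eq,
        not_false_iff, if_pos, decide_true, List.length_cons, List.length_append, id, hmax]
      constructor
      · rw [h1]
        simp only [Prod.mk.injEq]
        constructor <;> push_cast <;> omega
      · push_cast
        omega

-- the concatenation of the filtered lists is empty iff the filtered list itself is
theorem pv_flat_nil (tl : List (List Int)) :
    (tl.filter (fun t => t ≠ [])).flatMap id = [] ↔ (tl.filter (fun t => t ≠ [])) = [] := by
  induction tl with
  | nil => simp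
  | cons h t ih => by_cases hh : h = [] <;> simp [hh, ih]

-- ===== VERDICT (by name: the statement is the Claim_ definition above) =====
theorem count_operators_spec : Claim_equal_count_operators := by
  intro tl _
  unfold Spec_count_operators count_operators count_operators_alt
  obtain ⟨h1, h2⟩ := pv_fold_char tl 0 0
  rw [h1]
  dsimp only
  by_cases hK : (tl.filter (fun t => t ≠ [])) = []
  · have hf : (tl.filter (fun t => t ≠ [])).flatMap id = [] := (pv_flat_nil tl).mpr hK
    rw [hf, hK]
    simp
  · have hf : (tl.filter (fun t => t ≠ [])).flatMap id ≠ [] :=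
      fun h => hK ((pv_flat_nil tl).mp h)
    have hK1 : 1 ≤ ((tl.filter (fun t => t ≠ [])).length : Int) := by
      exact_mod_cast List.length_pos_of_ne_nil hK
    rw [if_pos hf]
    by_cases hb : ((0:Int) + ((tl.filter (fun t => t ≠ [])).length : Int)) > 1
    · rw [if_pos hb]; omega
    · rw [if_neg hb]; omega
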